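-- pv_equiv track=rewrite | github.com/yohannvb/Projet-Python | main.py | analyse_lexicale
-- ===== SOURCE A (Python) =====
-- def analyse_lexicale(code):
--     tokens = []
--     i = 0
--
--     while i < len(code):
--         # Ignorer les espaces
--         if code[i].isspace():
--             i += 1
--             continue
--
--         # Traitement des nombres
--         if code[i].isdigit():
--             num = ""
--             while i < len(code) and code[i].isdigit():
--                 num += code[i]
--                 i += 1
--             tokens.append({"type": "NUMBER", "value": num})
--             continue
--
--         # Traitement des variables
--         if code[i].isalpha() or code[i] == '_':
--             var = ""
--             while i < len(code) and (code[i].isalnum() or code[i] == '_'):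
--                 var += code[i]
--                 i += 1
--
--             # Vérifier si c'est un mot-clé
--             if var == "print":
--                 tokens.append({"type": "PRINT", "value": var})
--             else:
--                 tokens.append({"type": "VARIABLE", "value": var})
--             continue
--
--         # Traitement des opérateurs et caractères spéciaux
--         if code[i] == '+':
--             tokens.append({"type": "OPERATOR", "value": "+"})
--         elif code[i] == '-':
--             tokens.append({"type": "OPERATOR", "value": "-"})
--         elif code[i] == '*':
--             tokens.append({"type": "OPERATOR", "value": "*"})
--         elif code[i] == '/':
--             tokens.append({"type": "OPERATOR", "value": "/"})
--         elif code[i] == '=':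
--             tokens.append({"type": "ASSIGN", "value": "="})
--         elif code[i] == '(':
--             tokens.append({"type": "LPAREN", "value": "("})
--         elif code[i] == ')':
--             tokens.append({"type": "RPAREN", "value": ")"})
--         elif code[i] == '#':  # Commentaires
--             while i < len(code) and code[i] != '\n':
--                 i += 1
--             continue
--
--         i += 1
--
--     return tokens
-- ===== SOURCE B (Python) =====
-- SYMBOLS = {'+': "OPERATOR", '-': "OPERATOR", '*': "OPERATOR", '/': "OPERATOR",
--            '=': "ASSIGN", '(': "LPAREN", ')': "RPAREN"}
--
--
-- def analyse_lexicale(code):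
--     # One-pass state machine over the characters: instead of an index with
--     # nested inner while-loops, keep a mode (0 neutral, 1 number, 2 identifier,
--     # 3 comment) and a buffer, flushing the buffer when a token ends.
--     tokens = []
--     mode = 0
--     buf = ""
--
--     def flush():
--         nonlocal mode, buf
--         if mode == 1:
--             tokens.append({"type": "NUMBER", "value": buf})
--         elif mode == 2:
--             kind = "PRINT" if buf == "print" else "VARIABLE"
--             tokens.append({"type": kind, "value": buf})
--         mode = 0
--         buf = ""
--
--     for c in code:
--         if mode == 3:
--             if c == '\n':
--                 mode = 0
--             continue
--         if mode == 1 and c.isdigit():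
--             buf += c
--             continue
--         if mode == 2 and (c.isalnum() or c == '_'):
--             buf += c
--             continue
--         flush()
--         if c.isdigit():
--             mode = 1
--             buf = c
--         elif c.isalpha() or c == '_':
--             mode = 2
--             buf = c
--         elif c == '#':
--             mode = 3
--         else:
--             t = SYMBOLS.get(c)
--             if t is not None:
--                 tokens.append({"type": t, "value": c})
--     flush()
--     return tokens
-- ===== Notes on version B (the rewrite author's own statement) =====
-- stated objective: alternative
-- what changed: Replaces A's index-advancing scanner with nested inner while-loops (for numbers, identifiers and comments) by a single one-pass state-machine fold over the characters that keeps a mode and a buffer and flushes the buffer at token boundaries.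
import Mathlib
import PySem

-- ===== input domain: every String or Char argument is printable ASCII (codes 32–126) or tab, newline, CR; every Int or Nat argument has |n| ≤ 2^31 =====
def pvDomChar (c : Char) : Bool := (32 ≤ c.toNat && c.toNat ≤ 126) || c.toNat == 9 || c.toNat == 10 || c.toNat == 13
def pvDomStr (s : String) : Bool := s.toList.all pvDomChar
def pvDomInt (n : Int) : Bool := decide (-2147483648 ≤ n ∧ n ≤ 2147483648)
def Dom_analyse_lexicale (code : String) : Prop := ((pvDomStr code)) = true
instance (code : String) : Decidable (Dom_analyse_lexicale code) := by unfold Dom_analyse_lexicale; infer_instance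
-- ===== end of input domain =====

-- B replaces A's index-advancing scanner with nested inner while-loops by a single
-- one-pass state-machine fold (mode + buffer, flushed at token boundaries); objective: alternative.

-- a token {"type": t, "value": v} (both Pythons build this dict literal)
def tok (t v : String) : List (String × String) := [("type", t), ("value", v)]

-- ===== PORT A =====

-- inner while: collect digits
def aTakeNum : List Char → List Char → List Char × List Char
  | [], acc => (acc, [])
  | c :: r, acc => if PySem.Chars.isdigit c then aTakeNum r (acc ++ [c]) else (acc, c :: r)

-- inner while: collect identifier chars
def aTakeVar : List Char → List Char → List Char × List Char
  | [], acc => (acc, [])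
  | c :: r, acc =>
      if PySem.Chars.isalnum c || c == '_' then aTakeVar r (acc ++ [c]) else (acc, c :: r)

-- inner while: skip to the next newline (the newline itself is not consumed)
def aSkip : List Char → List Char
  | [] => []
  | c :: r => if c == '\n' then c :: r else aSkip r

lemma aTakeNum_len : ∀ (l acc : List Char), (aTakeNum l acc).2.length ≤ l.length := by
  intro l
  induction l with
  | nil => intro acc; simp [aTakeNum]
  | cons c r ih =>
      intro acc
      by_cases h : PySem.Chars.isdigit c = true
      · simp only [aTakeNum, h, if_true]
        exact Nat.le_succ_of_le (ih _)
      · simp [aTakeNum, h]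

lemma aTakeVar_len : ∀ (l acc : List Char), (aTakeVar l acc).2.length ≤ l.length := by
  intro l
  induction l with
  | nil => intro acc; simp [aTakeVar]
  | cons c r ih =>
      intro acc
      by_cases h : (PySem.Chars.isalnum c || c == '_') = true
      · simp only [aTakeVar, h, if_true]
        exact Nat.le_succ_of_le (ih _)
      · simp [aTakeVar, h]

lemma aSkip_len : ∀ (l : List Char), (aSkip l).length ≤ l.length := by
  intro l
  induction l with
  | nil => simp [aSkip]
  | cons c r ih =>
      by_cases h : (c == '\n') = true
      · simp [aSkip, h]
      · simp only [aSkip, h, if_false]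
        exact Nat.le_succ_of_le ih

-- the main while-loop of A, one recursive step per iteration that reaches `continue`/`i += 1`
def aLoop : List Char → List (List (String × String))
  | [] => []
  | c :: rest =>
    if PySem.Chars.isspace c then aLoop rest
    else if hd : PySem.Chars.isdigit c then
      tok "NUMBER" (String.mk (aTakeNum (c :: rest) []).1) :: aLoop (aTakeNum (c :: rest) []).2
    else if ha : PySem.Chars.isalpha c || c == '_' then
      (if (aTakeVar (c :: rest) []).1 = "print".toList then
         tok "PRINT" (String.mk (aTakeVar (c :: rest) []).1)
       else
         tok "VARIABLE" (String.mk (aTakeVar (c :: rest) []).1)) :: aLoop (aTakeVar (c :: rest) []).2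
    else if c == '+' then tok "OPERATOR" "+" :: aLoop rest
    else if c == '-' then tok "OPERATOR" "-" :: aLoop rest
    else if c == '*' then tok "OPERATOR" "*" :: aLoop rest
    else if c == '/' then tok "OPERATOR" "/" :: aLoop rest
    else if c == '=' then tok "ASSIGN" "=" :: aLoop rest
    else if c == '(' then tok "LPAREN" "(" :: aLoop rest
    else if c == ')' then tok "RPAREN" ")" :: aLoop rest
    else if hc : c == '#' then aLoop (aSkip (c :: rest))
    else aLoop rest
termination_by l => l.length
decreasing_by
  · simp
  · simp only [aTakeNum, hd, if_true, List.length_cons]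
    exact Nat.lt_succ_of_le (aTakeNum_len rest [c])
  · have h' : PySem.Chars.isalnum c || c == '_' := by
      simp only [PySem.Chars.isalnum]
      simp only [Bool.or_eq_true] at ha ⊢
      rcases ha with h | h
      · exact Or.inl (Or.inl h)
      · exact Or.inr h
    simp only [aTakeVar, h', if_true, List.length_cons]
    exact Nat.lt_succ_of_le (aTakeVar_len rest [c])
  all_goals simp_all [aSkip]
  · exact aSkip_len rest

def analyse_lexicale (code : String) : List (List (String × String)) :=
  aLoop code.toList

-- ===== PORT B =====

-- SYMBOLS dict of Source B
def bSyms : List (Char × String) :=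
  [('+', "OPERATOR"), ('-', "OPERATOR"), ('*', "OPERATOR"), ('/', "OPERATOR"),
   ('=', "ASSIGN"), ('(', "LPAREN"), (')', "RPAREN")]

-- flush(): emit the buffered token, reset mode and buffer
def bFlush (mode : Nat) (buf : List Char) (toks : List (List (String × String))) :
    List (List (String × String)) :=
  if mode == 1 then toks ++ [tok "NUMBER" (String.mk buf)]
  else if mode == 2 then
    toks ++ [tok (if buf = "print".toList then "PRINT" else "VARIABLE") (String.mk buf)]
  else toks

-- one iteration of Source B's `for c in code`, state = (mode, buf, tokens)
def bStep (s : Nat × List Char × List (List (String × String))) (c : Char) :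
    Nat × List Char × List (List (String × String)) :=
  let (mode, buf, toks) := s
  if mode == 3 then
    if c == '\n' then (0, buf, toks) else (3, buf, toks)
  else if mode == 1 && PySem.Chars.isdigit c then (1, buf ++ [c], toks)
  else if mode == 2 && (PySem.Chars.isalnum c || c == '_') then (2, buf ++ [c], toks)
  else
    let toks' := bFlush mode buf toks
    if PySem.Chars.isdigit c then (1, [c], toks')
    else if PySem.Chars.isalpha c || c == '_' then (2, [c], toks')
    else if c == '#' then (3, [], toks')
    else
      match List.lookup c bSyms with
      | some ty => (0, [], toks' ++ [tok ty (String.mk [c])])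
      | none => (0, [], toks')

def analyse_lexicale_alt (code : String) : List (List (String × String)) :=
  let s := code.toList.foldl bStep (0, [], [])
  bFlush s.1 s.2.1 s.2.2

-- ===== PRECONDITION & SPEC =====
def Spec_analyse_lexicale (code : String) (out : List (List (String × String))) : Prop := out = analyse_lexicale_alt code
instance (code : String) (out : List (List (String × String))) : Decidable (Spec_analyse_lexicale code out) := by unfold Spec_analyse_lexicale; infer_instance

-- ===== CLAIM (what is proved, stated in full; the proofs are below) =====
def Claim_equal_analyse_lexicale : Prop := ∀ (code : String), Dom_analyse_lexicale code → Spec_analyse_lexicale code (analyse_lexicale code)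

-- ===== LEMMAS AND PROOFS =====

lemma char_beq_false {c d : Char} (h : c.toNat ≠ d.toNat) : (c == d) = false := by
  simp only [beq_eq_false_iff_ne, ne_eq]
  intro he
  exact h (he ▸ rfl)

-- a whitespace character starts no token and matches no operator/paren/'#'
lemma isspace_class (c : Char) (h : PySem.Chars.isspace c = true) :
    PySem.Chars.isdigit c = false ∧ PySem.Chars.isalpha c = false ∧ (c == '_') = false ∧
    (c == '+') = false ∧ (c == '-') = false ∧ (c == '*') = false ∧ (c == '/') = false ∧
    (c == '=') = false ∧ (c == '(') = false ∧ (c == ')') = false ∧ (c == '#') = false := by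
  simp only [PySem.Chars.isspace, Bool.or_eq_true, Bool.and_eq_true, decide_eq_true_eq] at h
  have hd : PySem.Chars.isdigit c = false := by
    simp only [PySem.Chars.isdigit, Bool.and_eq_false_iff, decide_eq_false_iff_not]
    have h0 : ('0' ≤ c) = (48 ≤ c.toNat) := rfl
    have h9 : (c ≤ '9') = (c.toNat ≤ 57) := rfl
    rw [h0, h9]; omega
  have ha : PySem.Chars.isalpha c = false := by
    simp only [PySem.Chars.isalpha, PySem.Chars.isupper, PySem.Chars.islower,
      Bool.or_eq_false_iff, Bool.and_eq_false_iff, decide_eq_false_iff_not]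
    have hA : ('A' ≤ c) = (65 ≤ c.toNat) := rfl
    have hZ : (c ≤ 'Z') = (c.toNat ≤ 90) := rfl
    have ha' : ('a' ≤ c) = (97 ≤ c.toNat) := rfl
    have hz : (c ≤ 'z') = (c.toNat ≤ 122) := rfl
    rw [hA, hZ, ha', hz]; omega
  refine ⟨hd, ha, ?_, ?_, ?_, ?_, ?_, ?_, ?_, ?_, ?_⟩ <;>
    (apply char_beq_false;
     simp only [show ('_').toNat = 95 from rfl, show ('+').toNat = 43 from rfl,
       show ('-').toNat = 45 from rfl, show ('*').toNat = 42 from rfl,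
       show ('/').toNat = 47 from rfl, show ('=').toNat = 61 from rfl,
       show ('(').toNat = 40 from rfl, show (')').toNat = 41 from rfl,
       show ('#').toNat = 35 from rfl];
     omega)

lemma bStep_flush_num (b : List Char) (t : List (List (String × String))) (c : Char)
    (h : PySem.Chars.isdigit c = false) :
    bStep (1, b, t) c = bStep (0, [], t ++ [tok "NUMBER" (String.mk b)]) c := by
  simp [bStep, bFlush, h]

lemma bStep_flush_var (b : List Char) (t : List (List (String × String))) (c : Char)
    (h : (PySem.Chars.isalnum c || c == '_') = false) :
    bStep (2, b, t) c =
      bStep (0, [],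
        t ++ [tok (if b = "print".toList then "PRINT" else "VARIABLE") (String.mk b)]) c := by
  have hd : PySem.Chars.isdigit c = false := by
    simp only [PySem.Chars.isalnum, Bool.or_eq_false_iff] at h
    exact h.1.2
  simp [bStep, bFlush, h, hd]

lemma numRed : ∀ (l b : List Char) (t : List (List (String × String))),
    List.foldl bStep (1, b, t) l =
      if (aTakeNum l b).2 = [] then (1, (aTakeNum l b).1, t)
      else List.foldl bStep (0, [], t ++ [tok "NUMBER" (String.mk (aTakeNum l b).1)])
            (aTakeNum l b).2 := by
  intro l
  induction l with
  | nil => intro b t; simp [aTakeNum]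
  | cons c r ih =>
      intro b t
      by_cases h : PySem.Chars.isdigit c = true
      · simp only [aTakeNum, h, if_true, List.foldl_cons]
        have hs : bStep (1, b, t) c = (1, b ++ [c], t) := by simp [bStep, h]
        rw [hs]; exact ih _ _
      · have h' : PySem.Chars.isdigit c = false := by simpa using h
        simp only [aTakeNum, h', Bool.false_eq_true, if_false, List.foldl_cons,
          List.cons_ne_self]
        rw [if_neg (by simp)]
        rw [bStep_flush_num _ _ _ h']

lemma varRed : ∀ (l b : List Char) (t : List (List (String × String))),
    List.foldl bStep (2, b, t) l =
      if (aTakeVar l b).2 = [] then (2, (aTakeVar l b).1, t)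
      else List.foldl bStep (0, [],
            t ++ [tok (if (aTakeVar l b).1 = "print".toList then "PRINT" else "VARIABLE")
                    (String.mk (aTakeVar l b).1)])
            (aTakeVar l b).2 := by
  intro l
  induction l with
  | nil => intro b t; simp [aTakeVar]
  | cons c r ih =>
      intro b t
      by_cases h : (PySem.Chars.isalnum c || c == '_') = true
      · simp only [aTakeVar, h, if_true, List.foldl_cons]
        have hs : bStep (2, b, t) c = (2, b ++ [c], t) := by simp [bStep, h]
        rw [hs]; exact ih _ _
      · have h' : (PySem.Chars.isalnum c || c == '_') = false := by simpa using h
        simp only [aTakeVar, h', Bool.false_eq_true, if_false, List.foldl_cons]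
        rw [if_neg (by simp)]
        rw [bStep_flush_var _ _ _ h']

lemma commentRed : ∀ (l : List Char) (t : List (List (String × String))),
    List.foldl bStep (3, [], t) l =
      if aSkip l = [] then (3, [], t)
      else List.foldl bStep (0, [], t) (aSkip l) := by
  intro l
  induction l with
  | nil => intro t; simp [aSkip]
  | cons c r ih =>
      intro t
      by_cases h : (c == '\n') = true
      · have hc : c = '\n' := by simpa using h
        subst hc
        simp only [aSkip, BEq.refl, if_true]
        rw [if_neg (by simp)]
        simp only [List.foldl_cons]
        have h1 : bStep (3, [], t) '\n' = (0, [], t) := by simp [bStep]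
        have h2 : bStep (0, [], t) '\n' = (0, [], t) := by
          simp [bStep, bFlush, bSyms, List.lookup, PySem.Chars.isdigit, PySem.Chars.isalpha,
            PySem.Chars.isupper, PySem.Chars.islower]
        rw [h1, h2]
      · have h' : (c == '\n') = false := by simpa using h
        simp only [aSkip, h', Bool.false_eq_true, if_false, List.foldl_cons]
        have hs : bStep (3, [], t) c = (3, [], t) := by simp [bStep, h']
        rw [hs]; exact ih t

lemma mainLemma : ∀ (n : Nat) (l : List Char), l.length ≤ n →
    ∀ (t : List (List (String × String))),
      bFlush (List.foldl bStep (0, [], t) l).1 (List.foldl bStep (0, [], t) l).2.1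
          (List.foldl bStep (0, [], t) l).2.2
        = t ++ aLoop l := by
  intro n
  induction n with
  | zero =>
      intro l hl t
      have : l = [] := List.length_eq_zero_iff.mp (Nat.le_zero.mp hl)
      subst this
      simp [aLoop, bFlush]
  | succ n ih =>
      intro l hl t
      cases l with
      | nil => simp [aLoop, bFlush]
      | cons c rest =>
          simp only [List.length_cons, Nat.succ_le_succ_iff] at hl
          by_cases hs : PySem.Chars.isspace c = true
          · obtain ⟨f1, f2, f3, f4, f5, f6, f7, f8, f9, f10, f11⟩ := isspace_class c hs
            have hst : bStep (0, [], t) c = (0, [], t) := by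
              simp [bStep, bFlush, f1, f2, f3, f4, f5, f6, f7, f8, f9, f10, f11,
                bSyms, List.lookup]
            rw [List.foldl_cons, hst, ih rest hl t]
            simp [aLoop, hs]
          · have hs' : PySem.Chars.isspace c = false := by simpa using hs
            by_cases hd : PySem.Chars.isdigit c = true
            · -- number token
              have hst : bStep (0, [], t) c = (1, [c], t) := by simp [bStep, bFlush, hd]
              have htk : aTakeNum (c :: rest) [] = aTakeNum rest [c] := by
                simp [aTakeNum, hd]
              have hA : aLoop (c :: rest)
                  = tok "NUMBER" (String.mk (aTakeNum rest [c]).1)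
                      :: aLoop (aTakeNum rest [c]).2 := by
                rw [aLoop.eq_def]; simp [hs', hd, htk]
              rw [List.foldl_cons, hst, numRed rest [c] t, hA]
              by_cases hnil : (aTakeNum rest [c]).2 = []
              · rw [if_pos hnil, hnil]; simp [bFlush, aLoop]
              · rw [if_neg hnil, ih _ (le_trans (aTakeNum_len rest [c]) hl)]
                simp
            · have hd' : PySem.Chars.isdigit c = false := by simpa using hd
              by_cases ha : (PySem.Chars.isalpha c || c == '_') = true
              · -- identifier token
                have han : (PySem.Chars.isalnum c || c == '_') = true := by
                  simp only [PySem.Chars.isalnum, Bool.or_eq_true] at ha ⊢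
                  rcases ha with h | h
                  · exact Or.inl (Or.inl h)
                  · exact Or.inr h
                have hst : bStep (0, [], t) c = (2, [c], t) := by
                  simp [bStep, bFlush, hd', ha]
                have htk : aTakeVar (c :: rest) [] = aTakeVar rest [c] := by
                  simp [aTakeVar, han]
                have hA : aLoop (c :: rest)
                    = tok (if (aTakeVar rest [c]).1 = "print".toList then "PRINT" else "VARIABLE")
                        (String.mk (aTakeVar rest [c]).1)
                        :: aLoop (aTakeVar rest [c]).2 := by
                  rw [aLoop.eq_def]
                  simp [hs', hd', ha, htk]
                  split <;> simp [tok]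
                rw [List.foldl_cons, hst, varRed rest [c] t, hA]
                by_cases hnil : (aTakeVar rest [c]).2 = []
                · rw [if_pos hnil, hnil]; simp [bFlush, aLoop]
                · rw [if_neg hnil, ih _ (le_trans (aTakeVar_len rest [c]) hl)]
                  simp
              · have ha' : (PySem.Chars.isalpha c || c == '_') = false := by simpa using ha
                by_cases hh : (c == '#') = true
                · -- comment
                  have hc : c = '#' := by simpa using hh
                  subst hc
                  have hst : bStep (0, [], t) '#' = (3, [], t) := by
                    simp [bStep, bFlush, PySem.Chars.isdigit, PySem.Chars.isalpha,
                      PySem.Chars.isupper, PySem.Chars.islower]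
                  have hsk : aSkip ('#' :: rest) = aSkip rest := by simp [aSkip]
                  have hA : aLoop ('#' :: rest) = aLoop (aSkip rest) := by
                    rw [aLoop.eq_def]
                    simp [hsk, PySem.Chars.isspace, PySem.Chars.isdigit, PySem.Chars.isalpha,
                      PySem.Chars.isupper, PySem.Chars.islower]
                  rw [List.foldl_cons, hst, commentRed rest t, hA]
                  by_cases hnil : aSkip rest = []
                  · rw [if_pos hnil, hnil]; simp [bFlush, aLoop]
                  · rw [if_neg hnil, ih _ (le_trans (aSkip_len rest) hl)]
                · have hh' : (c == '#') = false := by simpa using hh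
                  by_cases hp1 : (c == '+') = true
                  · have hc : c = '+' := by simpa using hp1
                    subst hc
                    have hst : bStep (0, [], t) '+' = (0, [], t ++ [tok "OPERATOR" "+"]) := by
                      simp [bStep, bFlush, bSyms, List.lookup, PySem.Chars.isdigit,
                        PySem.Chars.isalpha, PySem.Chars.isupper, PySem.Chars.islower]
                      rfl
                    have hA : aLoop ('+' :: rest) = tok "OPERATOR" "+" :: aLoop rest := by
                      rw [aLoop.eq_def]; simp [PySem.Chars.isspace, PySem.Chars.isdigit, PySem.Chars.isalpha, PySem.Chars.isupper, PySem.Chars.islower]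
                    rw [List.foldl_cons, hst, ih rest hl, hA]; simp
                  · by_cases hp2 : (c == '-') = true
                    · have hc : c = '-' := by simpa using hp2
                      subst hc
                      have hst : bStep (0, [], t) '-' = (0, [], t ++ [tok "OPERATOR" "-"]) := by
                        simp [bStep, bFlush, bSyms, List.lookup, PySem.Chars.isdigit,
                          PySem.Chars.isalpha, PySem.Chars.isupper, PySem.Chars.islower]
                        rfl
                      have hA : aLoop ('-' :: rest) = tok "OPERATOR" "-" :: aLoop rest := by
                        rw [aLoop.eq_def]; simp [PySem.Chars.isspace, PySem.Chars.isdigit, PySem.Chars.isalpha, PySem.Chars.isupper, PySem.Chars.islower]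
                      rw [List.foldl_cons, hst, ih rest hl, hA]; simp
                    · by_cases hp3 : (c == '*') = true
                      · have hc : c = '*' := by simpa using hp3
                        subst hc
                        have hst : bStep (0, [], t) '*' = (0, [], t ++ [tok "OPERATOR" "*"]) := by
                          simp [bStep, bFlush, bSyms, List.lookup, PySem.Chars.isdigit,
                            PySem.Chars.isalpha, PySem.Chars.isupper, PySem.Chars.islower]
                          rfl
                        have hA : aLoop ('*' :: rest) = tok "OPERATOR" "*" :: aLoop rest := by
                          rw [aLoop.eq_def]; simp [PySem.Chars.isspace, PySem.Chars.isdigit, PySem.Chars.isalpha, PySem.Chars.isupper, PySem.Chars.islower]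
                        rw [List.foldl_cons, hst, ih rest hl, hA]; simp
                      · by_cases hp4 : (c == '/') = true
                        · have hc : c = '/' := by simpa using hp4
                          subst hc
                          have hst : bStep (0, [], t) '/' = (0, [], t ++ [tok "OPERATOR" "/"]) := by
                            simp [bStep, bFlush, bSyms, List.lookup, PySem.Chars.isdigit,
                              PySem.Chars.isalpha, PySem.Chars.isupper, PySem.Chars.islower]
                            rfl
                          have hA : aLoop ('/' :: rest) = tok "OPERATOR" "/" :: aLoop rest := by
                            rw [aLoop.eq_def]; simp [PySem.Chars.isspace, PySem.Chars.isdigit, PySem.Chars.isalpha, PySem.Chars.isupper, PySem.Chars.islower]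
                          rw [List.foldl_cons, hst, ih rest hl, hA]; simp
                        · by_cases hp5 : (c == '=') = true
                          · have hc : c = '=' := by simpa using hp5
                            subst hc
                            have hst : bStep (0, [], t) '=' = (0, [], t ++ [tok "ASSIGN" "="]) := by
                              simp [bStep, bFlush, bSyms, List.lookup, PySem.Chars.isdigit,
                                PySem.Chars.isalpha, PySem.Chars.isupper, PySem.Chars.islower]
                              rfl
                            have hA : aLoop ('=' :: rest) = tok "ASSIGN" "=" :: aLoop rest := by
                              rw [aLoop.eq_def]; simp [PySem.Chars.isspace, PySem.Chars.isdigit, PySem.Chars.isalpha, PySem.Chars.isupper, PySem.Chars.islower]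
                            rw [List.foldl_cons, hst, ih rest hl, hA]; simp
                          · by_cases hp6 : (c == '(') = true
                            · have hc : c = '(' := by simpa using hp6
                              subst hc
                              have hst : bStep (0, [], t) '(' = (0, [], t ++ [tok "LPAREN" "("]) := by
                                simp [bStep, bFlush, bSyms, List.lookup, PySem.Chars.isdigit,
                                  PySem.Chars.isalpha, PySem.Chars.isupper, PySem.Chars.islower]
                                rfl
                              have hA : aLoop ('(' :: rest) = tok "LPAREN" "(" :: aLoop rest := by
                                rw [aLoop.eq_def]; simp [PySem.Chars.isspace, PySem.Chars.isdigit, PySem.Chars.isalpha, PySem.Chars.isupper, PySem.Chars.islower]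
                              rw [List.foldl_cons, hst, ih rest hl, hA]; simp
                            · by_cases hp7 : (c == ')') = true
                              · have hc : c = ')' := by simpa using hp7
                                subst hc
                                have hst : bStep (0, [], t) ')' = (0, [], t ++ [tok "RPAREN" ")"]) := by
                                  simp [bStep, bFlush, bSyms, List.lookup, PySem.Chars.isdigit,
                                    PySem.Chars.isalpha, PySem.Chars.isupper, PySem.Chars.islower]
                                  rfl
                                have hA : aLoop (')' :: rest) = tok "RPAREN" ")" :: aLoop rest := by
                                  rw [aLoop.eq_def]; simp [PySem.Chars.isspace, PySem.Chars.isdigit, PySem.Chars.isalpha, PySem.Chars.isupper, PySem.Chars.islower]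
                                rw [List.foldl_cons, hst, ih rest hl, hA]; simp
                              · -- unknown character: both scanners skip it
                                have hp1' : (c == '+') = false := by simpa using hp1
                                have hp2' : (c == '-') = false := by simpa using hp2
                                have hp3' : (c == '*') = false := by simpa using hp3
                                have hp4' : (c == '/') = false := by simpa using hp4
                                have hp5' : (c == '=') = false := by simpa using hp5
                                have hp6' : (c == '(') = false := by simpa using hp6
                                have hp7' : (c == ')') = false := by simpa using hp7
                                have hst : bStep (0, [], t) c = (0, [], t) := by
                                  simp [bStep, bFlush, hd', ha', hh', bSyms, List.lookup,
                                    hp1', hp2', hp3', hp4', hp5', hp6', hp7']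
                                have hA : aLoop (c :: rest) = aLoop rest := by
                                  rw [aLoop.eq_def]
                                  simp [hs', hd', ha', hh', hp1', hp2', hp3', hp4', hp5',
                                    hp6', hp7']
                                rw [List.foldl_cons, hst, ih rest hl, hA]

-- ===== VERDICT (by name: the statement is the Claim_ definition above) =====
theorem analyse_lexicale_spec : Claim_equal_analyse_lexicale := by
  intro code _
  unfold Spec_analyse_lexicale analyse_lexicale analyse_lexicale_alt
  have := mainLemma code.toList.length code.toList (Nat.le_refl _) []
  simpa using this.symm
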